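-- pv_equiv track=rewrite | github.com/NikodemJachec99/PLAN_ZAJEC | backend/app/data_loader.py | _month_to_number
-- ===== SOURCE A (Python) =====
-- import unicodedata
--
-- def _ascii_lower(value: str) -> str:
--     normalized = unicodedata.normalize("NFKD", value or "")
--     stripped = "".join(char for char in normalized if not unicodedata.combining(char))
--     return stripped.strip().lower()
--
-- def _month_to_number(value: str) -> int | None:
--     normalized = _ascii_lower(value)
--     if not normalized:
--         return None
--
--     mapping = {
--         "styczen": 1,
--         "luty": 2,
--         "marzec": 3,
--         "kwiecien": 4,
--         "maj": 5,
--         "czerwiec": 6,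
--         "lipiec": 7,
--         "sierpien": 8,
--         "wrzesien": 9,
--         "pazdziernik": 10,
--         "listopad": 11,
--         "grudzien": 12,
--     }
--
--     for label, month in mapping.items():
--         if normalized.startswith(label):
--             return month
--     return None
-- ===== SOURCE B (Python) =====
-- import unicodedata
--
-- def _ascii_lower(value: str) -> str:
--     normalized = unicodedata.normalize("NFKD", value or "")
--     stripped = "".join(char for char in normalized if not unicodedata.combining(char))
--     return stripped.strip().lower()
--
-- # Every month label is uniquely determined by its first three letters, and no
-- # label is a prefix of another; one dict probe on normalized[:3] picks the only
-- # possible candidate, a single prefix comparison confirms it.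
-- _BY3 = {
--     "sty": ("styczen", 1),
--     "lut": ("luty", 2),
--     "mar": ("marzec", 3),
--     "kwi": ("kwiecien", 4),
--     "maj": ("maj", 5),
--     "cze": ("czerwiec", 6),
--     "lip": ("lipiec", 7),
--     "sie": ("sierpien", 8),
--     "wrz": ("wrzesien", 9),
--     "paz": ("pazdziernik", 10),
--     "lis": ("listopad", 11),
--     "gru": ("grudzien", 12),
-- }
--
-- def _month_to_number(value: str) -> int | None:
--     normalized = _ascii_lower(value)
--     if not normalized:
--         return None
--     hit = _BY3.get(normalized[:3])
--     if hit is None: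
--         return None
--     label, month = hit
--     return month if normalized.startswith(label) else None
-- ===== Notes on version B (the rewrite author's own statement) =====
-- stated objective: alternative
-- what changed: Replaced the ordered scan of all twelve labels with startswith by a loop-free lookup: one dict probe keyed on the first three normalized characters (which uniquely determine the candidate label) followed by a single prefix comparison.
import Mathlib
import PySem

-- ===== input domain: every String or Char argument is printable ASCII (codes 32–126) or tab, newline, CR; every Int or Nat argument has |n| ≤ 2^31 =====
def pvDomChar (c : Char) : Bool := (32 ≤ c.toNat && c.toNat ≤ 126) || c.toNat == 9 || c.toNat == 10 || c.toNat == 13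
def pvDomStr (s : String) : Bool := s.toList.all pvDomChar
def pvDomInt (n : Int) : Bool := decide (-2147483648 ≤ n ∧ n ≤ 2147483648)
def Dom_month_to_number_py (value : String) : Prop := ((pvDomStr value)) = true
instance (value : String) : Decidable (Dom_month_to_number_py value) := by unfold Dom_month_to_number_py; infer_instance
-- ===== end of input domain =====

-- B replaces A's ordered startswith-scan of the twelve month labels by a loop-free
-- lookup: one dict probe keyed on the first three normalized characters (which
-- uniquely determine the only candidate label) plus a single prefix comparison
-- (an alternative algorithm of the same measured cost).
-- `_ascii_lower`'s NFKD normalization and combining-mark removal are the identity on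
-- the ASCII input domain, so both ports transcribe it as strip-then-lower (exact on Dom).

-- ===== PORT A =====
def pyAsciiLower (value : String) : String :=
  PySem.Str.lower (PySem.Str.strip value)

def mtnMapping : PySem.Dict String Int := PySem.Dict.mk
  [("styczen", 1), ("luty", 2), ("marzec", 3), ("kwiecien", 4), ("maj", 5), ("czerwiec", 6), ("lipiec", 7), ("sierpien", 8), ("wrzesien", 9), ("pazdziernik", 10), ("listopad", 11), ("grudzien", 12)]

def mtnScanA (normalized : String) : List (String × Int) → Option Int
  | [] => none
  | (label, month) :: rest =>
    if PySem.Str.startswith normalized label then some month else mtnScanA normalized rest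

def month_to_number_py (value : String) : Option Int :=
  let normalized := pyAsciiLower value
  if normalized = "" then none
  else mtnScanA normalized mtnMapping.items

-- ===== PORT B =====
def mtnBy3 : PySem.Dict String (String × Int) := PySem.Dict.mk
  [("sty", ("styczen", 1)), ("lut", ("luty", 2)), ("mar", ("marzec", 3)), ("kwi", ("kwiecien", 4)), ("maj", ("maj", 5)), ("cze", ("czerwiec", 6)), ("lip", ("lipiec", 7)), ("sie", ("sierpien", 8)), ("wrz", ("wrzesien", 9)), ("paz", ("pazdziernik", 10)), ("lis", ("listopad", 11)), ("gru", ("grudzien", 12))]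

def month_to_number_py_alt (value : String) : Option Int :=
  let normalized := pyAsciiLower value
  if normalized = "" then none
  else
    match PySem.Dict.get? mtnBy3 (PySem.Str.slice normalized none (some 3)) with
    | none => none
    | some (label, month) =>
      if PySem.Str.startswith normalized label then some month else none

-- ===== PRECONDITION & SPEC =====
def Spec_month_to_number_py (value : String) (out : Option Int) : Prop := out = month_to_number_py_alt value
instance (value : String) (out : Option Int) : Decidable (Spec_month_to_number_py value out) := by unfold Spec_month_to_number_py; infer_instance

-- ===== CLAIM (what is proved, stated in full; the proofs are below) =====
def Claim_equal_month_to_number_py : Prop := ∀ (value : String), Dom_month_to_number_py value → Spec_month_to_number_py value (month_to_number_py value)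

-- ===== LEMMAS AND PROOFS =====
lemma toList_slice_take (s : String) (li : Int) (l : Nat) (hl : li.toNat = l) (hl0 : 0 ≤ li) :
    (PySem.Str.slice s none (some li)).toList = s.toList.take l := by
  rw [PySem.Str.toList_slice, PySem.Chars.slice_eq_listSlice, PySem.List.slice_to _ hl0, hl]

lemma slice_eq_of_take (s : String) (li : Int) (l : Nat) (hl : li.toNat = l) (hl0 : 0 ≤ li)
    (w : String) (h : s.toList.take l = w.toList) : PySem.Str.slice s none (some li) = w :=
  String.toList_inj.mp (by rw [toList_slice_take s li l hl hl0, h])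

lemma take_down (cs w : List Char) (l m : Nat) (hm : m ≤ l) (h : cs.take l = w) :
    cs.take m = w.take m := by
  rw [← h, List.take_take, Nat.min_eq_left hm]

lemma sw_iff (s w : String) (l : Nat) (hl : w.toList.length = l) :
    PySem.Str.startswith s w = true ↔ s.toList.take l = w.toList := by
  rw [PySem.Str.startswith_eq, PySem.Chars.startswith_iff, List.prefix_iff_eq_take, hl, eq_comm]

lemma sw_false (s w : String) (l : Nat) (hl : w.toList.length = l)
    (h : s.toList.take l ≠ w.toList) : PySem.Str.startswith s w = false :=
  Bool.eq_false_iff.mpr (fun hT => h ((sw_iff s w l hl).mp hT))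

set_option maxHeartbeats 1000000 in
lemma mtn_main (s : String) : mtnScanA s mtnMapping.items =
    (match PySem.Dict.get? mtnBy3 (PySem.Str.slice s none (some 3)) with
     | none => none
     | some (label, month) => if PySem.Str.startswith s label then some month else none) := by
  by_cases h_styczen : s.toList.take 7 = "styczen".toList
  · -- the "styczen" branch
    have ht : PySem.Str.startswith s "styczen" = true := (sw_iff s "styczen" 7 (by decide)).mpr h_styczen
    have e3 : PySem.Str.slice s none (some 3) = "sty" :=
      slice_eq_of_take s 3 3 rfl (by norm_num) "sty"
        (by rw [take_down s.toList "styczen".toList 7 3 (by norm_num) h_styczen]; decide)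
    have hg : PySem.Dict.get? mtnBy3 "sty" = some (("styczen" : String), (1 : Int)) := by decide
    simp only [mtnMapping, mtnScanA, ht, if_true, e3, hg]
  by_cases h_luty : s.toList.take 4 = "luty".toList
  · -- the "luty" branch
    have hf_styczen : PySem.Str.startswith s "styczen" = false := sw_false s "styczen" 7 (by decide) h_styczen
    have ht : PySem.Str.startswith s "luty" = true := (sw_iff s "luty" 4 (by decide)).mpr h_luty
    have e3 : PySem.Str.slice s none (some 3) = "lut" :=
      slice_eq_of_take s 3 3 rfl (by norm_num) "lut"
        (by rw [take_down s.toList "luty".toList 4 3 (by norm_num) h_luty]; decide)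
    have hg : PySem.Dict.get? mtnBy3 "lut" = some (("luty" : String), (2 : Int)) := by decide
    simp only [mtnMapping, mtnScanA, hf_styczen, ht, Bool.false_eq_true, if_false, if_true, e3, hg]
  by_cases h_marzec : s.toList.take 6 = "marzec".toList
  · -- the "marzec" branch
    have hf_styczen : PySem.Str.startswith s "styczen" = false := sw_false s "styczen" 7 (by decide) h_styczen
    have hf_luty : PySem.Str.startswith s "luty" = false := sw_false s "luty" 4 (by decide) h_luty
    have ht : PySem.Str.startswith s "marzec" = true := (sw_iff s "marzec" 6 (by decide)).mpr h_marzec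
    have e3 : PySem.Str.slice s none (some 3) = "mar" :=
      slice_eq_of_take s 3 3 rfl (by norm_num) "mar"
        (by rw [take_down s.toList "marzec".toList 6 3 (by norm_num) h_marzec]; decide)
    have hg : PySem.Dict.get? mtnBy3 "mar" = some (("marzec" : String), (3 : Int)) := by decide
    simp only [mtnMapping, mtnScanA, hf_styczen, hf_luty, ht, Bool.false_eq_true, if_false, if_true, e3, hg]
  by_cases h_kwiecien : s.toList.take 8 = "kwiecien".toList
  · -- the "kwiecien" branch
    have hf_styczen : PySem.Str.startswith s "styczen" = false := sw_false s "styczen" 7 (by decide) h_styczen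
    have hf_luty : PySem.Str.startswith s "luty" = false := sw_false s "luty" 4 (by decide) h_luty
    have hf_marzec : PySem.Str.startswith s "marzec" = false := sw_false s "marzec" 6 (by decide) h_marzec
    have ht : PySem.Str.startswith s "kwiecien" = true := (sw_iff s "kwiecien" 8 (by decide)).mpr h_kwiecien
    have e3 : PySem.Str.slice s none (some 3) = "kwi" :=
      slice_eq_of_take s 3 3 rfl (by norm_num) "kwi"
        (by rw [take_down s.toList "kwiecien".toList 8 3 (by norm_num) h_kwiecien]; decide)
    have hg : PySem.Dict.get? mtnBy3 "kwi" = some (("kwiecien" : String), (4 : Int)) := by decide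
    simp only [mtnMapping, mtnScanA, hf_styczen, hf_luty, hf_marzec, ht, Bool.false_eq_true, if_false, if_true, e3, hg]
  by_cases h_maj : s.toList.take 3 = "maj".toList
  · -- the "maj" branch
    have hf_styczen : PySem.Str.startswith s "styczen" = false := sw_false s "styczen" 7 (by decide) h_styczen
    have hf_luty : PySem.Str.startswith s "luty" = false := sw_false s "luty" 4 (by decide) h_luty
    have hf_marzec : PySem.Str.startswith s "marzec" = false := sw_false s "marzec" 6 (by decide) h_marzec
    have hf_kwiecien : PySem.Str.startswith s "kwiecien" = false := sw_false s "kwiecien" 8 (by decide) h_kwiecien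
    have ht : PySem.Str.startswith s "maj" = true := (sw_iff s "maj" 3 (by decide)).mpr h_maj
    have e3 : PySem.Str.slice s none (some 3) = "maj" :=
      slice_eq_of_take s 3 3 rfl (by norm_num) "maj"
        (by rw [take_down s.toList "maj".toList 3 3 (by norm_num) h_maj]; decide)
    have hg : PySem.Dict.get? mtnBy3 "maj" = some (("maj" : String), (5 : Int)) := by decide
    simp only [mtnMapping, mtnScanA, hf_styczen, hf_luty, hf_marzec, hf_kwiecien, ht, Bool.false_eq_true, if_false, if_true, e3, hg]
  by_cases h_czerwiec : s.toList.take 8 = "czerwiec".toList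
  · -- the "czerwiec" branch
    have hf_styczen : PySem.Str.startswith s "styczen" = false := sw_false s "styczen" 7 (by decide) h_styczen
    have hf_luty : PySem.Str.startswith s "luty" = false := sw_false s "luty" 4 (by decide) h_luty
    have hf_marzec : PySem.Str.startswith s "marzec" = false := sw_false s "marzec" 6 (by decide) h_marzec
    have hf_kwiecien : PySem.Str.startswith s "kwiecien" = false := sw_false s "kwiecien" 8 (by decide) h_kwiecien
    have hf_maj : PySem.Str.startswith s "maj" = false := sw_false s "maj" 3 (by decide) h_maj
    have ht : PySem.Str.startswith s "czerwiec" = true := (sw_iff s "czerwiec" 8 (by decide)).mpr h_czerwiec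
    have e3 : PySem.Str.slice s none (some 3) = "cze" :=
      slice_eq_of_take s 3 3 rfl (by norm_num) "cze"
        (by rw [take_down s.toList "czerwiec".toList 8 3 (by norm_num) h_czerwiec]; decide)
    have hg : PySem.Dict.get? mtnBy3 "cze" = some (("czerwiec" : String), (6 : Int)) := by decide
    simp only [mtnMapping, mtnScanA, hf_styczen, hf_luty, hf_marzec, hf_kwiecien, hf_maj, ht, Bool.false_eq_true, if_false, if_true, e3, hg]
  by_cases h_lipiec : s.toList.take 6 = "lipiec".toList
  · -- the "lipiec" branch
    have hf_styczen : PySem.Str.startswith s "styczen" = false := sw_false s "styczen" 7 (by decide) h_styczen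
    have hf_luty : PySem.Str.startswith s "luty" = false := sw_false s "luty" 4 (by decide) h_luty
    have hf_marzec : PySem.Str.startswith s "marzec" = false := sw_false s "marzec" 6 (by decide) h_marzec
    have hf_kwiecien : PySem.Str.startswith s "kwiecien" = false := sw_false s "kwiecien" 8 (by decide) h_kwiecien
    have hf_maj : PySem.Str.startswith s "maj" = false := sw_false s "maj" 3 (by decide) h_maj
    have hf_czerwiec : PySem.Str.startswith s "czerwiec" = false := sw_false s "czerwiec" 8 (by decide) h_czerwiec
    have ht : PySem.Str.startswith s "lipiec" = true := (sw_iff s "lipiec" 6 (by decide)).mpr h_lipiec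
    have e3 : PySem.Str.slice s none (some 3) = "lip" :=
      slice_eq_of_take s 3 3 rfl (by norm_num) "lip"
        (by rw [take_down s.toList "lipiec".toList 6 3 (by norm_num) h_lipiec]; decide)
    have hg : PySem.Dict.get? mtnBy3 "lip" = some (("lipiec" : String), (7 : Int)) := by decide
    simp only [mtnMapping, mtnScanA, hf_styczen, hf_luty, hf_marzec, hf_kwiecien, hf_maj, hf_czerwiec, ht, Bool.false_eq_true, if_false, if_true, e3, hg]
  by_cases h_sierpien : s.toList.take 8 = "sierpien".toList
  · -- the "sierpien" branch
    have hf_styczen : PySem.Str.startswith s "styczen" = false := sw_false s "styczen" 7 (by decide) h_styczen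
    have hf_luty : PySem.Str.startswith s "luty" = false := sw_false s "luty" 4 (by decide) h_luty
    have hf_marzec : PySem.Str.startswith s "marzec" = false := sw_false s "marzec" 6 (by decide) h_marzec
    have hf_kwiecien : PySem.Str.startswith s "kwiecien" = false := sw_false s "kwiecien" 8 (by decide) h_kwiecien
    have hf_maj : PySem.Str.startswith s "maj" = false := sw_false s "maj" 3 (by decide) h_maj
    have hf_czerwiec : PySem.Str.startswith s "czerwiec" = false := sw_false s "czerwiec" 8 (by decide) h_czerwiec
    have hf_lipiec : PySem.Str.startswith s "lipiec" = false := sw_false s "lipiec" 6 (by decide) h_lipiec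
    have ht : PySem.Str.startswith s "sierpien" = true := (sw_iff s "sierpien" 8 (by decide)).mpr h_sierpien
    have e3 : PySem.Str.slice s none (some 3) = "sie" :=
      slice_eq_of_take s 3 3 rfl (by norm_num) "sie"
        (by rw [take_down s.toList "sierpien".toList 8 3 (by norm_num) h_sierpien]; decide)
    have hg : PySem.Dict.get? mtnBy3 "sie" = some (("sierpien" : String), (8 : Int)) := by decide
    simp only [mtnMapping, mtnScanA, hf_styczen, hf_luty, hf_marzec, hf_kwiecien, hf_maj, hf_czerwiec, hf_lipiec, ht, Bool.false_eq_true, if_false, if_true, e3, hg]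
  by_cases h_wrzesien : s.toList.take 8 = "wrzesien".toList
  · -- the "wrzesien" branch
    have hf_styczen : PySem.Str.startswith s "styczen" = false := sw_false s "styczen" 7 (by decide) h_styczen
    have hf_luty : PySem.Str.startswith s "luty" = false := sw_false s "luty" 4 (by decide) h_luty
    have hf_marzec : PySem.Str.startswith s "marzec" = false := sw_false s "marzec" 6 (by decide) h_marzec
    have hf_kwiecien : PySem.Str.startswith s "kwiecien" = false := sw_false s "kwiecien" 8 (by decide) h_kwiecien
    have hf_maj : PySem.Str.startswith s "maj" = false := sw_false s "maj" 3 (by decide) h_maj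
    have hf_czerwiec : PySem.Str.startswith s "czerwiec" = false := sw_false s "czerwiec" 8 (by decide) h_czerwiec
    have hf_lipiec : PySem.Str.startswith s "lipiec" = false := sw_false s "lipiec" 6 (by decide) h_lipiec
    have hf_sierpien : PySem.Str.startswith s "sierpien" = false := sw_false s "sierpien" 8 (by decide) h_sierpien
    have ht : PySem.Str.startswith s "wrzesien" = true := (sw_iff s "wrzesien" 8 (by decide)).mpr h_wrzesien
    have e3 : PySem.Str.slice s none (some 3) = "wrz" :=
      slice_eq_of_take s 3 3 rfl (by norm_num) "wrz"
        (by rw [take_down s.toList "wrzesien".toList 8 3 (by norm_num) h_wrzesien]; decide)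
    have hg : PySem.Dict.get? mtnBy3 "wrz" = some (("wrzesien" : String), (9 : Int)) := by decide
    simp only [mtnMapping, mtnScanA, hf_styczen, hf_luty, hf_marzec, hf_kwiecien, hf_maj, hf_czerwiec, hf_lipiec, hf_sierpien, ht, Bool.false_eq_true, if_false, if_true, e3, hg]
  by_cases h_pazdziernik : s.toList.take 11 = "pazdziernik".toList
  · -- the "pazdziernik" branch
    have hf_styczen : PySem.Str.startswith s "styczen" = false := sw_false s "styczen" 7 (by decide) h_styczen
    have hf_luty : PySem.Str.startswith s "luty" = false := sw_false s "luty" 4 (by decide) h_luty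
    have hf_marzec : PySem.Str.startswith s "marzec" = false := sw_false s "marzec" 6 (by decide) h_marzec
    have hf_kwiecien : PySem.Str.startswith s "kwiecien" = false := sw_false s "kwiecien" 8 (by decide) h_kwiecien
    have hf_maj : PySem.Str.startswith s "maj" = false := sw_false s "maj" 3 (by decide) h_maj
    have hf_czerwiec : PySem.Str.startswith s "czerwiec" = false := sw_false s "czerwiec" 8 (by decide) h_czerwiec
    have hf_lipiec : PySem.Str.startswith s "lipiec" = false := sw_false s "lipiec" 6 (by decide) h_lipiec
    have hf_sierpien : PySem.Str.startswith s "sierpien" = false := sw_false s "sierpien" 8 (by decide) h_sierpien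
    have hf_wrzesien : PySem.Str.startswith s "wrzesien" = false := sw_false s "wrzesien" 8 (by decide) h_wrzesien
    have ht : PySem.Str.startswith s "pazdziernik" = true := (sw_iff s "pazdziernik" 11 (by decide)).mpr h_pazdziernik
    have e3 : PySem.Str.slice s none (some 3) = "paz" :=
      slice_eq_of_take s 3 3 rfl (by norm_num) "paz"
        (by rw [take_down s.toList "pazdziernik".toList 11 3 (by norm_num) h_pazdziernik]; decide)
    have hg : PySem.Dict.get? mtnBy3 "paz" = some (("pazdziernik" : String), (10 : Int)) := by decide
    simp only [mtnMapping, mtnScanA, hf_styczen, hf_luty, hf_marzec, hf_kwiecien, hf_maj, hf_czerwiec, hf_lipiec, hf_sierpien, hf_wrzesien, ht, Bool.false_eq_true, if_false, if_true, e3, hg]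
  by_cases h_listopad : s.toList.take 8 = "listopad".toList
  · -- the "listopad" branch
    have hf_styczen : PySem.Str.startswith s "styczen" = false := sw_false s "styczen" 7 (by decide) h_styczen
    have hf_luty : PySem.Str.startswith s "luty" = false := sw_false s "luty" 4 (by decide) h_luty
    have hf_marzec : PySem.Str.startswith s "marzec" = false := sw_false s "marzec" 6 (by decide) h_marzec
    have hf_kwiecien : PySem.Str.startswith s "kwiecien" = false := sw_false s "kwiecien" 8 (by decide) h_kwiecien
    have hf_maj : PySem.Str.startswith s "maj" = false := sw_false s "maj" 3 (by decide) h_maj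
    have hf_czerwiec : PySem.Str.startswith s "czerwiec" = false := sw_false s "czerwiec" 8 (by decide) h_czerwiec
    have hf_lipiec : PySem.Str.startswith s "lipiec" = false := sw_false s "lipiec" 6 (by decide) h_lipiec
    have hf_sierpien : PySem.Str.startswith s "sierpien" = false := sw_false s "sierpien" 8 (by decide) h_sierpien
    have hf_wrzesien : PySem.Str.startswith s "wrzesien" = false := sw_false s "wrzesien" 8 (by decide) h_wrzesien
    have hf_pazdziernik : PySem.Str.startswith s "pazdziernik" = false := sw_false s "pazdziernik" 11 (by decide) h_pazdziernik
    have ht : PySem.Str.startswith s "listopad" = true := (sw_iff s "listopad" 8 (by decide)).mpr h_listopad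
    have e3 : PySem.Str.slice s none (some 3) = "lis" :=
      slice_eq_of_take s 3 3 rfl (by norm_num) "lis"
        (by rw [take_down s.toList "listopad".toList 8 3 (by norm_num) h_listopad]; decide)
    have hg : PySem.Dict.get? mtnBy3 "lis" = some (("listopad" : String), (11 : Int)) := by decide
    simp only [mtnMapping, mtnScanA, hf_styczen, hf_luty, hf_marzec, hf_kwiecien, hf_maj, hf_czerwiec, hf_lipiec, hf_sierpien, hf_wrzesien, hf_pazdziernik, ht, Bool.false_eq_true, if_false, if_true, e3, hg]
  by_cases h_grudzien : s.toList.take 8 = "grudzien".toList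
  · -- the "grudzien" branch
    have hf_styczen : PySem.Str.startswith s "styczen" = false := sw_false s "styczen" 7 (by decide) h_styczen
    have hf_luty : PySem.Str.startswith s "luty" = false := sw_false s "luty" 4 (by decide) h_luty
    have hf_marzec : PySem.Str.startswith s "marzec" = false := sw_false s "marzec" 6 (by decide) h_marzec
    have hf_kwiecien : PySem.Str.startswith s "kwiecien" = false := sw_false s "kwiecien" 8 (by decide) h_kwiecien
    have hf_maj : PySem.Str.startswith s "maj" = false := sw_false s "maj" 3 (by decide) h_maj
    have hf_czerwiec : PySem.Str.startswith s "czerwiec" = false := sw_false s "czerwiec" 8 (by decide) h_czerwiec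
    have hf_lipiec : PySem.Str.startswith s "lipiec" = false := sw_false s "lipiec" 6 (by decide) h_lipiec
    have hf_sierpien : PySem.Str.startswith s "sierpien" = false := sw_false s "sierpien" 8 (by decide) h_sierpien
    have hf_wrzesien : PySem.Str.startswith s "wrzesien" = false := sw_false s "wrzesien" 8 (by decide) h_wrzesien
    have hf_pazdziernik : PySem.Str.startswith s "pazdziernik" = false := sw_false s "pazdziernik" 11 (by decide) h_pazdziernik
    have hf_listopad : PySem.Str.startswith s "listopad" = false := sw_false s "listopad" 8 (by decide) h_listopad
    have ht : PySem.Str.startswith s "grudzien" = true := (sw_iff s "grudzien" 8 (by decide)).mpr h_grudzien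
    have e3 : PySem.Str.slice s none (some 3) = "gru" :=
      slice_eq_of_take s 3 3 rfl (by norm_num) "gru"
        (by rw [take_down s.toList "grudzien".toList 8 3 (by norm_num) h_grudzien]; decide)
    have hg : PySem.Dict.get? mtnBy3 "gru" = some (("grudzien" : String), (12 : Int)) := by decide
    simp only [mtnMapping, mtnScanA, hf_styczen, hf_luty, hf_marzec, hf_kwiecien, hf_maj, hf_czerwiec, hf_lipiec, hf_sierpien, hf_wrzesien, hf_pazdziernik, hf_listopad, ht, Bool.false_eq_true, if_false, if_true, e3, hg]
  -- no label matches
  have hf_styczen : PySem.Str.startswith s "styczen" = false := sw_false s "styczen" 7 (by decide) h_styczen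
  have hf_luty : PySem.Str.startswith s "luty" = false := sw_false s "luty" 4 (by decide) h_luty
  have hf_marzec : PySem.Str.startswith s "marzec" = false := sw_false s "marzec" 6 (by decide) h_marzec
  have hf_kwiecien : PySem.Str.startswith s "kwiecien" = false := sw_false s "kwiecien" 8 (by decide) h_kwiecien
  have hf_maj : PySem.Str.startswith s "maj" = false := sw_false s "maj" 3 (by decide) h_maj
  have hf_czerwiec : PySem.Str.startswith s "czerwiec" = false := sw_false s "czerwiec" 8 (by decide) h_czerwiec
  have hf_lipiec : PySem.Str.startswith s "lipiec" = false := sw_false s "lipiec" 6 (by decide) h_lipiec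
  have hf_sierpien : PySem.Str.startswith s "sierpien" = false := sw_false s "sierpien" 8 (by decide) h_sierpien
  have hf_wrzesien : PySem.Str.startswith s "wrzesien" = false := sw_false s "wrzesien" 8 (by decide) h_wrzesien
  have hf_pazdziernik : PySem.Str.startswith s "pazdziernik" = false := sw_false s "pazdziernik" 11 (by decide) h_pazdziernik
  have hf_listopad : PySem.Str.startswith s "listopad" = false := sw_false s "listopad" 8 (by decide) h_listopad
  have hf_grudzien : PySem.Str.startswith s "grudzien" = false := sw_false s "grudzien" 8 (by decide) h_grudzien
  simp only [mtnMapping, mtnScanA, hf_styczen, hf_luty, hf_marzec, hf_kwiecien, hf_maj, hf_czerwiec, hf_lipiec, hf_sierpien, hf_wrzesien, hf_pazdziernik, hf_listopad, hf_grudzien, Bool.false_eq_true, if_false]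
  rcases hg : PySem.Dict.get? mtnBy3 (PySem.Str.slice s none (some 3)) with _ | ⟨label, month⟩
  · rfl
  · simp only [mtnBy3, PySem.Dict.get?_mk_cons] at hg
    by_cases b0 : ("sty" == PySem.Str.slice s none (some 3)) = true
    · rw [if_pos b0] at hg
      injection hg with hp; injection hp with h1 h2; subst h1; simp only [hf_styczen, Bool.false_eq_true, if_false]
    rw [if_neg b0] at hg
    by_cases b1 : ("lut" == PySem.Str.slice s none (some 3)) = true
    · rw [if_pos b1] at hg
      injection hg with hp; injection hp with h1 h2; subst h1; simp only [hf_luty, Bool.false_eq_true, if_false]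
    rw [if_neg b1] at hg
    by_cases b2 : ("mar" == PySem.Str.slice s none (some 3)) = true
    · rw [if_pos b2] at hg
      injection hg with hp; injection hp with h1 h2; subst h1; simp only [hf_marzec, Bool.false_eq_true, if_false]
    rw [if_neg b2] at hg
    by_cases b3 : ("kwi" == PySem.Str.slice s none (some 3)) = true
    · rw [if_pos b3] at hg
      injection hg with hp; injection hp with h1 h2; subst h1; simp only [hf_kwiecien, Bool.false_eq_true, if_false]
    rw [if_neg b3] at hg
    by_cases b4 : ("maj" == PySem.Str.slice s none (some 3)) = true
    · rw [if_pos b4] at hg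
      injection hg with hp; injection hp with h1 h2; subst h1; simp only [hf_maj, Bool.false_eq_true, if_false]
    rw [if_neg b4] at hg
    by_cases b5 : ("cze" == PySem.Str.slice s none (some 3)) = true
    · rw [if_pos b5] at hg
      injection hg with hp; injection hp with h1 h2; subst h1; simp only [hf_czerwiec, Bool.false_eq_true, if_false]
    rw [if_neg b5] at hg
    by_cases b6 : ("lip" == PySem.Str.slice s none (some 3)) = true
    · rw [if_pos b6] at hg
      injection hg with hp; injection hp with h1 h2; subst h1; simp only [hf_lipiec, Bool.false_eq_true, if_false]
    rw [if_neg b6] at hg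
    by_cases b7 : ("sie" == PySem.Str.slice s none (some 3)) = true
    · rw [if_pos b7] at hg
      injection hg with hp; injection hp with h1 h2; subst h1; simp only [hf_sierpien, Bool.false_eq_true, if_false]
    rw [if_neg b7] at hg
    by_cases b8 : ("wrz" == PySem.Str.slice s none (some 3)) = true
    · rw [if_pos b8] at hg
      injection hg with hp; injection hp with h1 h2; subst h1; simp only [hf_wrzesien, Bool.false_eq_true, if_false]
    rw [if_neg b8] at hg
    by_cases b9 : ("paz" == PySem.Str.slice s none (some 3)) = true
    · rw [if_pos b9] at hg
      injection hg with hp; injection hp with h1 h2; subst h1; simp only [hf_pazdziernik, Bool.false_eq_true, if_false]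
    rw [if_neg b9] at hg
    by_cases b10 : ("lis" == PySem.Str.slice s none (some 3)) = true
    · rw [if_pos b10] at hg
      injection hg with hp; injection hp with h1 h2; subst h1; simp only [hf_listopad, Bool.false_eq_true, if_false]
    rw [if_neg b10] at hg
    by_cases b11 : ("gru" == PySem.Str.slice s none (some 3)) = true
    · rw [if_pos b11] at hg
      injection hg with hp; injection hp with h1 h2; subst h1; simp only [hf_grudzien, Bool.false_eq_true, if_false]
    rw [if_neg b11] at hg
    simp [PySem.Dict.get?] at hg

-- ===== VERDICT (by name: the statement is the Claim_ definition above) =====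
theorem month_to_number_py_spec : Claim_equal_month_to_number_py := by
  unfold Claim_equal_month_to_number_py
  intro value _
  unfold Spec_month_to_number_py month_to_number_py month_to_number_py_alt
  by_cases hn : pyAsciiLower value = ""
  · simp [hn]
  · simp only [hn, if_false]
    exact mtn_main (pyAsciiLower value)
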